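-- pv_equiv track=rewrite | github.com/CarlCypress/Multi-Concept-Attribute-Reduction | attribute_reduction/Pfunc.py | init_div_list
-- ===== SOURCE A (Python) =====
-- def init_div_list(length: int, n: int) -> list:
--     """
--     将 `length` '均分'成 `n` 个元素。
--     即返回长度为 `n` 的list，第i个元素代表第i批的元素个数。
--     """
--     down = length // n
--     div = [down for i in range(n)]
--     leave, idx = length - down * n, n - 1
--     # 下面对严格均分后的list末尾添加剩余元素，直至length个元素添加完成
--     while leave > 0:
--         div[idx] += 1
--         leave -= 1
--         idx -= 1
--         pass
--     return div
-- ===== SOURCE B (Python) =====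
-- def init_div_list(length: int, n: int) -> list:
--     """Fair split by repeated extraction: the next part always gets the floor
--     quotient of the remaining length over the remaining number of parts."""
--     out = []
--     while n > 0:
--         first = length // n
--         out.append(first)
--         length -= first
--         n -= 1
--     return out
-- ===== Notes on version B (the rewrite author's own statement) =====
-- stated objective: alternative
-- what changed: Replaces A's fill-then-patch scheme (n copies of length//n, then a while-loop incrementing the tail) with a single extraction loop that recomputes the floor quotient of the REMAINING length over the REMAINING number of parts at every step and appends it.
import Mathlib
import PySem

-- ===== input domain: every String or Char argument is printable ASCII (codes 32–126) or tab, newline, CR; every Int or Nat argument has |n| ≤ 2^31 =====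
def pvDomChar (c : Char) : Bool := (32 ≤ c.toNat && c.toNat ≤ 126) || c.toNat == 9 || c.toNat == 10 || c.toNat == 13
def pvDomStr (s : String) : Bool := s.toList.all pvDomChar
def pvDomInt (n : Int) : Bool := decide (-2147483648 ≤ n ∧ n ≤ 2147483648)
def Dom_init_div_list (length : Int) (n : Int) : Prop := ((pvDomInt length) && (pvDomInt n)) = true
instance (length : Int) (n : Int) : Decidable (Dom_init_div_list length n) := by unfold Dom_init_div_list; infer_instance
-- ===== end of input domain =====

-- B replaces A's fill-then-patch loop by a single extraction loop: each step hands the next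
-- part the floor quotient of the remaining length over the remaining parts; A is ported literally.
-- ===== PORT A =====
-- 'div[idx] += 1' for a possibly negative (wrapping) index; out-of-range indices never occur
-- in runs that return (0 ≤ leave < n there), so the getD default is unreachable.
def pvIncAt (div : List Int) (idx : Int) : List Int :=
  if idx < 0 then div.set (idx + div.length).toNat (div.getD (idx + div.length).toNat 0 + 1)
  else div.set idx.toNat (div.getD idx.toNat 0 + 1)

-- the while-loop: while leave > 0: div[idx] += 1; leave -= 1; idx -= 1
def pvLoopA (div : List Int) (leave idx : Int) : List Int :=
  if h : leave > 0 then pvLoopA (pvIncAt div idx) (leave - 1) (idx - 1) else div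
  termination_by leave.toNat
  decreasing_by omega

def init_div_list (length : Int) (n : Int) : List Int :=
  let down := PySem.Int.floordiv length n
  let div := (PySem.List.pyRange 0 n 1).map (fun _ => down)
  pvLoopA div (length - down * n) (n - 1)

-- ===== PORT B =====
-- the while-loop: while n > 0: first = length // n; out.append(first); length -= first; n -= 1
def pvLoopB (length n : Int) (out : List Int) : List Int :=
  if h : n > 0 then
    pvLoopB (length - PySem.Int.floordiv length n) (n - 1) (out ++ [PySem.Int.floordiv length n])
  else out
  termination_by n.toNat
  decreasing_by omega

def init_div_list_alt (length : Int) (n : Int) : List Int := pvLoopB length n []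

-- ===== PRECONDITION & SPEC =====
-- n = 0 makes Python's '//' raise ZeroDivisionError in A
def Pre_init_div_list (length : Int) (n : Int) : Prop := n ≠ 0
instance (length : Int) (n : Int) : Decidable (Pre_init_div_list length n) := by unfold Pre_init_div_list; infer_instance
def pvWitness_init_div_list : Int × Int := (10, 3)

def Spec_init_div_list (length : Int) (n : Int) (out : List Int) : Prop := out = init_div_list_alt length n
instance (length : Int) (n : Int) (out : List Int) : Decidable (Spec_init_div_list length n out) := by unfold Spec_init_div_list; infer_instance

-- ===== CLAIM (what is proved, stated in full; the proofs are below) =====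
def Claim_equal_init_div_list : Prop := ∀ (length : Int) (n : Int), Dom_init_div_list length n → Pre_init_div_list length n → Spec_init_div_list length n (init_div_list length n)

-- ===== LEMMAS AND PROOFS =====

-- setting the last element of the first (replicate) block moves it to the second block
lemma set_last_replicate (d v : Int) (a b : Nat) :
    (List.replicate (a + 1) d ++ List.replicate b v).set a v
      = List.replicate a d ++ List.replicate (b + 1) v := by
  induction a with
  | zero => simp [List.replicate_succ]
  | succ k ih => simpa [List.replicate_succ] using ih

lemma getD_last_replicate (d v : Int) (a b : Nat) :
    (List.replicate (a + 1) d ++ List.replicate b v).getD a 0 = d := by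
  induction a with
  | zero => simp [List.replicate_succ]
  | succ k ih => simpa [List.replicate_succ] using ih

-- A-side loop invariant: after incrementing the last j elements, k more steps extend the high block
lemma pvLoopA_spec (d : Int) : ∀ (k j m : Nat), k + j ≤ m →
    pvLoopA (List.replicate (m - j) d ++ List.replicate j (d + 1)) (k : Int) ((m : Int) - j - 1)
      = List.replicate (m - (j + k)) d ++ List.replicate (j + k) (d + 1) := by
  intro k
  induction k with
  | zero => intro j m _; rw [pvLoopA]; simp
  | succ k ih =>
    intro j m hle
    rw [pvLoopA]
    have h1 : ((k + 1 : Nat) : Int) > 0 := by push_cast; omega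
    rw [dif_pos h1]
    have hidx : (m : Int) - j - 1 = ((m - j - 1 : Nat) : Int) := by omega
    have hge : ¬ ((m : Int) - j - 1 < 0) := by omega
    have hmj : m - j = (m - j - 1) + 1 := by omega
    have hstep : pvIncAt (List.replicate (m - j) d ++ List.replicate j (d + 1)) ((m : Int) - j - 1)
        = List.replicate (m - (j + 1)) d ++ List.replicate (j + 1) (d + 1) := by
      unfold pvIncAt
      rw [if_neg hge, hidx, Int.toNat_natCast, hmj]
      simp only [Nat.add_sub_cancel]
      rw [getD_last_replicate, set_last_replicate]
      congr 2
    rw [hstep]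
    have h2 : ((k + 1 : Nat) : Int) - 1 = (k : Nat) := by push_cast; ring
    have h3 : (m : Int) - j - 1 - 1 = (m : Int) - (j + 1 : Nat) - 1 := by push_cast; ring
    rw [h2, h3]
    rw [ih (j + 1) m (by omega)]
    congr 2 <;> omega

-- B-side: the extraction loop appends the two-block closed form, by induction on n
lemma pvLoopB_closed : ∀ (k : Nat) (L n : Int) (out : List Int), 0 < n → n.toNat = k + 1 →
    pvLoopB L n out
      = out ++ (List.replicate (n - PySem.Int.mod L n).toNat (PySem.Int.floordiv L n)
          ++ List.replicate (PySem.Int.mod L n).toNat (PySem.Int.floordiv L n + 1)) := by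
  intro k
  induction k with
  | zero =>
    intro L n out hn hk
    have hn1 : n = 1 := by omega
    subst hn1
    rw [pvLoopB, dif_pos (by omega), pvLoopB, dif_neg (by omega)]
    rw [PySem.Int.floordiv_eq_ediv_of_pos (by omega), PySem.Int.mod_eq_emod_of_pos (by omega)]
    have h1 : L / 1 = L := Int.ediv_one L
    have h2 : L % 1 = 0 := Int.emod_one L
    simp [h1, h2]
  | succ k ih =>
    intro L n out hn hk
    rw [pvLoopB, dif_pos (by omega)]
    rw [PySem.Int.floordiv_eq_ediv_of_pos hn, PySem.Int.mod_eq_emod_of_pos hn]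
    set d := L / n with hd
    set r := L % n with hr
    have hdr1 : n * d + r = L := by rw [hd, hr]; exact Int.mul_ediv_add_emod L n
    have hr0 : 0 ≤ r := by rw [hr]; exact Int.emod_nonneg L (by omega)
    have hrlt : r < n := by rw [hr]; exact Int.emod_lt_of_pos L hn
    have hn1 : (0:Int) < n - 1 := by omega
    rw [ih (L - d) (n - 1) (out ++ [d]) hn1 (by omega)]
    rw [PySem.Int.floordiv_eq_ediv_of_pos hn1, PySem.Int.mod_eq_emod_of_pos hn1]
    by_cases hcase : r < n - 1
    · -- remainder untouched: the remaining loop has the same quotient d and remainder r,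
      -- and the appended d joins the low block
      have hLd : L - d = r + d * (n - 1) := by linear_combination -hdr1
      have hd2 : (L - d) / (n - 1) = d := by
        rw [hLd, Int.add_mul_ediv_right _ _ (by omega : (n-1:Int) ≠ 0),
          Int.ediv_eq_zero_of_lt hr0 hcase, zero_add]
      have hr2 : (L - d) % (n - 1) = r := by
        rw [hLd, Int.add_mul_emod_self_right, Int.emod_eq_of_lt hr0 hcase]
      rw [hd2, hr2]
      have hsz : (n - r).toNat = (n - 1 - r).toNat + 1 := by omega
      rw [hsz, List.replicate_succ]
      simp
    · -- r = n - 1: the rest splits evenly into parts of d + 1; the appended d is the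
      -- single low element
      have hreq : r = n - 1 := by omega
      have hLd : L - d = (d + 1) * (n - 1) := by linear_combination -hdr1 + hreq
      have hd2 : (L - d) / (n - 1) = d + 1 := by
        rw [hLd, Int.mul_ediv_cancel _ (by omega : (n-1:Int) ≠ 0)]
      have hr2 : (L - d) % (n - 1) = 0 := by rw [hLd, Int.mul_emod_left]
      rw [hd2, hr2, hreq]
      have h0 : ((0:Int)).toNat = 0 := rfl
      have h1 : (n - (n - 1)).toNat = 1 := by omega
      have h2 : (n - 1 - 0).toNat = (n - 1).toNat := by omega
      rw [h0, h1, h2]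
      simp

theorem init_div_list_spec : Claim_equal_init_div_list := by
  intro length n _ hn
  unfold Spec_init_div_list
  rcases lt_or_gt_of_ne hn with hneg | hpos
  · -- n < 0: A's range is empty and the loop does not run; B's base case gives []
    simp only [init_div_list]
    rw [PySem.List.pyRange_one_eq_nil (by omega)]
    have hb := PySem.Int.mod_neg_bounds length hneg
    have hmod : length - PySem.Int.floordiv length n * n = PySem.Int.mod length n := by
      linarith [PySem.Int.floordiv_mul_add_mod length n]
    rw [pvLoopA]
    simp only [List.map_nil]
    rw [dif_neg (by omega)]
    simp only [init_div_list_alt]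
    rw [pvLoopB, dif_neg (by omega)]
  · -- n > 0: both sides equal the two-block closed form
    have hA : init_div_list length n
        = List.replicate (n - PySem.Int.mod length n).toNat (PySem.Int.floordiv length n)
            ++ List.replicate (PySem.Int.mod length n).toNat (PySem.Int.floordiv length n + 1) := by
      simp only [init_div_list]
      set d := PySem.Int.floordiv length n with hd
      have hmod : length - d * n = PySem.Int.mod length n := by
        linarith [PySem.Int.floordiv_mul_add_mod length n]
      have hb1 := PySem.Int.mod_nonneg length hpos
      have hb2 := PySem.Int.mod_lt length hpos
      have hrng : (PySem.List.pyRange 0 n 1).map (fun _ => d) = List.replicate n.toNat d := by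
        rw [PySem.List.pyRange_one]
        simp [List.eq_replicate_iff]
      rw [hrng]
      set leave := length - d * n with hl
      have hcast : leave = ((leave.toNat : Nat) : Int) := by omega
      have hk : leave.toNat + 0 ≤ n.toNat := by omega
      have := pvLoopA_spec d leave.toNat 0 n.toNat hk
      simp only [Nat.sub_zero, List.replicate_zero, List.append_nil, Nat.zero_add,
        Nat.cast_zero] at this
      have hidx : (n : Int) - 1 = ((n.toNat : Nat) : Int) - 0 - 1 := by omega
      rw [← hidx, ← hcast] at this
      rw [this]
      congr 2 <;> omega
    rw [hA]
    simp only [init_div_list_alt]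
    rw [pvLoopB_closed (n.toNat - 1) length n [] hpos (by omega), List.nil_append]
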